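-- pv_equiv track=rewrite | github.com/Naveenkumar315/Income_Analyzer | backend/main.py | filter_documents_by_type
-- ===== SOURCE A (Python) =====
-- def filter_documents_by_type(processed_data, document_types):
--     """
--     Filter processed borrower data to include only specified document types.
--
--     Args:
--         processed_data (dict): The processed JSON data with borrower names as keys
--         document_types (list): List of document types to keep (e.g., ['Paystubs', 'W2'])
--
--     Returns:
--         dict: Filtered data containing only the specified document types for each borrower
--     """
--     filtered_data = {}
--
--     # Iterate through each borrower
--     for borrower_name, documents in processed_data.items():
--         filtered_borrower_data = {}
--
--         # Iterate through each document type for this borrower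
--         for doc_type, doc_list in documents.items():
--             # Check if this document type is in our filter list (case-insensitive)
--             if any(doc_type.lower() == filter_type.lower() for filter_type in document_types):
--                 filtered_borrower_data[doc_type] = doc_list
--
--         # ✅ UPDATED: Always include borrower, even with empty doc set
--         # This allows downstream logic to detect "missing docs" vs "missing borrower"
--         # and provides better audit trail and error messages
--         filtered_data[borrower_name] = filtered_borrower_data
--
--     return filtered_data
-- ===== SOURCE B (Python) =====
-- def filter_documents_by_type(processed_data, document_types):
--     filtered_data = {}
--     for borrower_name, documents in processed_data.items():
--         # stage 1: index the borrower's doc-type names by their lowercase form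
--         index = {}
--         for doc_type in documents:
--             index.setdefault(doc_type.lower(), []).append(doc_type)
--         # stage 2: gather the exact original keys requested, via the index
--         keep = set()
--         for filter_type in document_types:
--             keep.update(index.get(filter_type.lower(), []))
--         # stage 3: one filter pass by exact key membership
--         filtered_data[borrower_name] = {k: v for k, v in documents.items() if k in keep}
--     return filtered_data
-- ===== Notes on version B (the rewrite author's own statement) =====
-- stated objective: faster
-- what changed: Per borrower, B builds a lowercase->original-keys index, gathers the kept keys by a single pass over document_types via that index, and then filters the docs once by exact-key membership, so A's inner any-scan over document_types for every document type disappears.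
import Mathlib
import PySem

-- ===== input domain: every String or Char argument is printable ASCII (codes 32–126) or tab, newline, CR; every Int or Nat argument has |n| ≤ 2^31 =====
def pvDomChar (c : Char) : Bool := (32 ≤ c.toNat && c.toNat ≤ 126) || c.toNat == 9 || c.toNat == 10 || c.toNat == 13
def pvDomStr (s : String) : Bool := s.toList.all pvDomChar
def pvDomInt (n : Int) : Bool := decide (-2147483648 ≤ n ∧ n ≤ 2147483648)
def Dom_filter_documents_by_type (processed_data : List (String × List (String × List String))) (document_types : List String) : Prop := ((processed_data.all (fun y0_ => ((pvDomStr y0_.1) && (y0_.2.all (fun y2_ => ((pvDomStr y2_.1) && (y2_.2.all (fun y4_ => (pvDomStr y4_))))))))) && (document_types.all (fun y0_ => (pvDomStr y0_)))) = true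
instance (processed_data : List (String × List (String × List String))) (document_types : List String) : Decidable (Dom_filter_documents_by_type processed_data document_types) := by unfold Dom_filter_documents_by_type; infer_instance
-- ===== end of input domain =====

-- B replaces A's inner any-scan over document_types per doc type by a per-borrower staged
-- index (lowercase -> original keys), a gather of the kept keys over document_types, and one
-- exact-key filter pass (objective: faster).

-- ===== PORT A =====
def filter_documents_by_type (processed_data : List (String × List (String × List String))) (document_types : List String) : List (String × List (String × List String)) :=
  -- filtered_data = {}; for borrower_name, documents in processed_data.items(): …
  (processed_data.foldl (fun filtered_data bd =>
      -- filtered_borrower_data = {}; for doc_type, doc_list in documents.items():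
      --   if any(doc_type.lower() == filter_type.lower() for filter_type in document_types): fbd[doc_type] = doc_list
      filtered_data.insert bd.1
        ((bd.2.foldl (fun fbd dd =>
            if document_types.any (fun filter_type => PySem.Str.lower dd.1 == PySem.Str.lower filter_type)
            then fbd.insert dd.1 dd.2
            else fbd)
          (PySem.Dict.empty : PySem.Dict String (List String))).items))
    (PySem.Dict.empty : PySem.Dict String (List (String × List String)))).items

-- ===== PORT B =====
def filter_documents_by_type_alt (processed_data : List (String × List (String × List String))) (document_types : List String) : List (String × List (String × List String)) :=
  (processed_data.foldl (fun filtered_data bd =>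
      -- index = {}; for doc_type in documents: index.setdefault(doc_type.lower(), []).append(doc_type)
      let index : PySem.Dict String (List String) :=
        bd.2.foldl (fun ix dd => ix.modify (PySem.Str.lower dd.1) [] (· ++ [dd.1])) PySem.Dict.empty
      -- keep = set(); for filter_type in document_types: keep.update(index.get(filter_type.lower(), []))
      let keep : PySem.Set String :=
        document_types.foldl (fun s t => PySem.Set.update s (index.getD (PySem.Str.lower t) [])) PySem.Set.empty
      -- filtered_data[borrower_name] = {k: v for k, v in documents.items() if k in keep}
      filtered_data.insert bd.1
        (((bd.2.filter (fun dd => keep.contains dd.1)).foldl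
            (fun d dd => d.insert dd.1 dd.2) (PySem.Dict.empty : PySem.Dict String (List String))).items))
    (PySem.Dict.empty : PySem.Dict String (List (String × List String)))).items

-- ===== PRECONDITION & SPEC =====
def Spec_filter_documents_by_type (processed_data : List (String × List (String × List String))) (document_types : List String) (out : List (String × List (String × List String))) : Prop := out = filter_documents_by_type_alt processed_data document_types
instance (processed_data : List (String × List (String × List String))) (document_types : List String) (out : List (String × List (String × List String))) : Decidable (Spec_filter_documents_by_type processed_data document_types out) := by unfold Spec_filter_documents_by_type; infer_instance

-- ===== CLAIM (what is proved, stated in full; the proofs are below) =====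
def Claim_equal_filter_documents_by_type : Prop := ∀ (processed_data : List (String × List (String × List String))) (document_types : List String), Dom_filter_documents_by_type processed_data document_types → Spec_filter_documents_by_type processed_data document_types (filter_documents_by_type processed_data document_types)

-- ===== LEMMAS AND PROOFS =====

-- Membership in a bucket of B's per-borrower index: k is in bucket s iff it was already
-- there initially or k is a key of docs whose lowercase form is s.
theorem pv_index_mem (docs : List (String × List String)) :
    ∀ (ix : PySem.Dict String (List String)) (s k : String),
      k ∈ (docs.foldl (fun ix dd => ix.modify (PySem.Str.lower dd.1) [] (· ++ [dd.1])) ix).getD s []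
      ↔ k ∈ ix.getD s [] ∨ (k ∈ docs.map Prod.fst ∧ PySem.Str.lower k = s) := by
  induction docs with
  | nil => simp
  | cons dd rest ih =>
    intro ix s k
    simp only [List.foldl_cons, ih, PySem.Dict.getD_modify, List.map_cons, List.mem_cons]
    split_ifs with h
    · subst h
      constructor
      · rintro (h1 | h2)
        · rcases List.mem_append.mp h1 with h3 | h3
          · exact Or.inl h3
          · simp at h3; subst h3; exact Or.inr ⟨Or.inl rfl, rfl⟩
        · exact Or.inr ⟨Or.inr h2.1, h2.2⟩
      · rintro (h1 | ⟨h2 | h2, h3⟩)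
        · exact Or.inl (List.mem_append.mpr (Or.inl h1))
        · subst h2; exact Or.inl (List.mem_append.mpr (Or.inr (by simp)))
        · exact Or.inr ⟨h2, h3⟩
    · constructor
      · rintro (h1 | h2)
        · exact Or.inl h1
        · exact Or.inr ⟨Or.inr h2.1, h2.2⟩
      · rintro (h1 | ⟨h2 | h2, h3⟩)
        · exact Or.inl h1
        · subst h2; exact absurd h3.symm h
        · exact Or.inr ⟨h2, h3⟩

-- Membership in B's gathered keep set.
theorem pv_keep_mem (index : PySem.Dict String (List String)) (ts : List String) :
    ∀ (s0 : PySem.Set String) (k : String),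
      k ∈ ts.foldl (fun s t => PySem.Set.update s (index.getD (PySem.Str.lower t) [])) s0
      ↔ k ∈ s0 ∨ ∃ t ∈ ts, k ∈ index.getD (PySem.Str.lower t) [] := by
  induction ts with
  | nil => simp
  | cons t rest ih =>
    intro s0 k
    simp only [List.foldl_cons, ih, PySem.Set.mem_update, List.mem_cons]
    constructor
    · rintro ((h | h) | ⟨u, hu, hk⟩)
      · exact Or.inl h
      · exact Or.inr ⟨t, Or.inl rfl, h⟩
      · exact Or.inr ⟨u, Or.inr hu, hk⟩
    · rintro (h | ⟨u, hu | hu, hk⟩)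
      · exact Or.inl (Or.inl h)
      · subst hu; exact Or.inl (Or.inr hk)
      · exact Or.inr ⟨u, hu, hk⟩

-- On every key of docs, B's keep-membership test equals A's any-scan over document_types.
theorem pv_cond_eq (docs : List (String × List String)) (ts : List String)
    (dd : String × List String) (hdd : dd ∈ docs) :
    PySem.Set.contains
      (ts.foldl (fun s t => PySem.Set.update s
          ((docs.foldl (fun ix e => ix.modify (PySem.Str.lower e.1) [] (· ++ [e.1]))
              PySem.Dict.empty).getD (PySem.Str.lower t) []))
        PySem.Set.empty) dd.1
    = ts.any (fun filter_type => PySem.Str.lower dd.1 == PySem.Str.lower filter_type) := by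
  apply Bool.eq_iff_iff.mpr
  rw [PySem.Set.contains_iff]
  simp only [pv_keep_mem, pv_index_mem, PySem.Dict.getD_empty, List.any_eq_true, beq_iff_eq]
  constructor
  · rintro (h | ⟨t, ht, h | ⟨_, hl⟩⟩)
    · simp [PySem.Set.empty] at h
    · simp at h
    · exact ⟨t, ht, hl⟩
  · rintro ⟨t, ht, hl⟩
    exact Or.inr ⟨t, ht, Or.inr ⟨List.mem_map_of_mem hdd, hl⟩⟩

-- ===== VERDICT (by name: the statement is the Claim_ definition above) =====
theorem filter_documents_by_type_spec : Claim_equal_filter_documents_by_type := by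
  intro processed_data document_types _
  unfold Spec_filter_documents_by_type filter_documents_by_type filter_documents_by_type_alt
  refine congrArg PySem.Dict.items ?_
  apply List.foldl_ext
  intro acc bd _
  refine congrArg (acc.insert bd.1) (congrArg PySem.Dict.items ?_)
  rw [← List.foldl_filter]
  refine congrArg _ ?_
  apply List.filter_congr
  intro dd hdd
  exact (pv_cond_eq bd.2 document_types dd hdd).symm
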